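-- pv_equiv track=rewrite | github.com/Ratchet2277/advent-of-code | day-4/main.py | diagonal_matrix
-- ===== SOURCE A (Python) =====
-- def diagonal_matrix(lines: list[str]) -> list[str]:
--     output = []
--     max_line = len(lines)
--     max_col = max(len(x) for x in lines)
--
--     for i in range(max_line + max_col):
--         line = []
--         for x in range(i + 1):
--             y = i - x
--             if x >= max_line:
--                 break
--             if y >= max_col:
--                 continue
--             line.append(lines[x][y])
--         output.append(''.join(line))
--
--     return output
-- ===== SOURCE B (Python) =====
-- def diagonal_matrix(lines: list[str]) -> list[str]:
--     L = len(lines)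
--     C = max(len(s) for s in lines)
--     buckets = [[] for _ in range(L + C)]
--     for x, row in enumerate(lines):
--         for y in range(C):
--             buckets[x + y].append(row[y])
--     return [''.join(b) for b in buckets]
-- ===== Notes on version B (the rewrite author's own statement) =====
-- stated objective: faster
-- what changed: B replaces A's per-diagonal gather (for each of the L+C diagonals, scan x in range(i+1) with break/continue) by a single row-major scatter pass that appends each cell lines[x][y] into bucket x+y, then joins the buckets.
import Mathlib
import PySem

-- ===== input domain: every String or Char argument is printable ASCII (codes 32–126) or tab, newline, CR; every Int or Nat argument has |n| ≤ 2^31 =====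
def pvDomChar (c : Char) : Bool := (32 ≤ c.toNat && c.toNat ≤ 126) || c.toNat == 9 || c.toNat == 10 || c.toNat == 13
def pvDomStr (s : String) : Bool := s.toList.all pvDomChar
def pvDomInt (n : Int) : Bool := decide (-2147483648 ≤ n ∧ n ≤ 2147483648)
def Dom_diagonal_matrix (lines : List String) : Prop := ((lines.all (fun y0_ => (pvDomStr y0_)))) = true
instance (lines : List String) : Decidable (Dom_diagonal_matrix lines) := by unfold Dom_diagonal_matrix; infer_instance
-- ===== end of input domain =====

-- B replaces A's per-diagonal gather (scan of range(i+1) with break/continue) by a single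
-- row-major scatter pass appending each cell into a bucket list indexed by x+y.

-- max(len(x) for x in lines)   (ValueError on [] is excluded by Pre_)
def pvMaxCol (lines : List String) : Int :=
  (PySem.List.max? (lines.map (fun s => PySem.Str.len s)) (fun n => n)).getD 0

-- ===== PORT A =====
-- lines[x][i-x]; total via defaults, exact under Pre_ (equal line lengths)
def pvCharAt (lines : List String) (x y : Int) : Char :=
  ((PySem.Str.pyGet? ((PySem.List.pyGet? lines x).getD "") y).getD ' ')

-- inner 'for x in range(i+1)' with break (x >= max_line) and continue (y >= max_col)
def pvAInner (lines : List String) (maxLine maxCol i : Int) : List Int → List Char → List Char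
  | [], acc => acc
  | x :: rest, acc =>
    if maxLine ≤ x then acc
    else if maxCol ≤ i - x then pvAInner lines maxLine maxCol i rest acc
    else pvAInner lines maxLine maxCol i rest (acc ++ [pvCharAt lines x (i - x)])

def diagonal_matrix (lines : List String) : List String :=
  let maxLine : Int := PySem.List.len lines
  let maxCol : Int := pvMaxCol lines
  (PySem.List.pyRange 0 (maxLine + maxCol) 1).foldl
    (fun output i =>
      output ++ [String.ofList (pvAInner lines maxLine maxCol i (PySem.List.pyRange 0 (i + 1) 1) [])])
    []

-- ===== PORT B =====
-- buckets[x+y].append(row[y]), one row-major pass over all columns up to the width C; then join each bucket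
def diagonal_matrix_alt (lines : List String) : List String :=
  let L : Int := PySem.List.len lines
  let C : Int := pvMaxCol lines
  let buckets0 : List (List Char) := (PySem.List.pyRange 0 (L + C) 1).map (fun _ => [])
  let buckets :=
    (PySem.List.enumerate lines 0).foldl
      (fun bs p =>
        (PySem.List.pyRange 0 C 1).foldl
          (fun bs y =>
            PySem.List.pySetD bs (p.1 + y)
              (PySem.List.pyGetD bs (p.1 + y) [] ++ [(PySem.Str.pyGet? p.2 y).getD ' ']))
          bs)
      buckets0
  buckets.map (fun b => String.ofList b)

-- ===== PRECONDITION & SPEC =====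
-- Pre_ excludes exactly the inputs on which Python A raises: the empty list (ValueError from max())
-- and ragged matrices, where lines[x][y] raises IndexError for a line shorter than the longest one.
def Pre_diagonal_matrix (lines : List String) : Prop :=
  lines ≠ [] ∧ ∀ s ∈ lines, PySem.Str.len s = PySem.Str.len (lines.headD "")
instance (lines : List String) : Decidable (Pre_diagonal_matrix lines) := by unfold Pre_diagonal_matrix; infer_instance
def pvWitness_diagonal_matrix : List String := ["abc", "def"]

def Spec_diagonal_matrix (lines : List String) (out : List String) : Prop := out = diagonal_matrix_alt lines
instance (lines : List String) (out : List String) : Decidable (Spec_diagonal_matrix lines out) := by unfold Spec_diagonal_matrix; infer_instance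

-- ===== CLAIM (what is proved, stated in full; the proofs are below) =====
def Claim_equal_diagonal_matrix : Prop := ∀ (lines : List String), Dom_diagonal_matrix lines → Pre_diagonal_matrix lines → Spec_diagonal_matrix lines (diagonal_matrix lines)

-- ===== LEMMAS AND PROOFS =====

-- the characters of anti-diagonal j contributed by rows x, x+1, … (row r contributes r[j-x] when x ≤ j < x+|r|)
def pvGather : Nat → Nat → List (List Char) → List Char
  | _, _, [] => []
  | x, j, r :: rs =>
    (if x ≤ j ∧ j - x < r.length then [r.getD (j - x) ' '] else []) ++ pvGather (x + 1) j rs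

theorem pvGather_of_lt (j : Nat) : ∀ (x : Nat) (rs : List (List Char)), j < x → pvGather x j rs = [] := by
  intro x rs
  induction rs generalizing x with
  | nil => intro _; rfl
  | cons r rs ih =>
    intro h
    simp [pvGather, ih (x + 1) (by omega)]
    omega

theorem pvAInner_eq_gather (lines : List String) (c : Nat)
    (hlen : ∀ s ∈ lines, s.toList.length = c) (i : Int) (hi : 0 ≤ i) :
    ∀ (a : Int), 0 ≤ a → ∀ (acc : List Char),
      pvAInner lines (lines.length : Int) (c : Int) i (PySem.List.pyRange a (i + 1) 1) acc
        = acc ++ pvGather a.toNat i.toNat ((lines.map String.toList).drop a.toNat) := by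
  intro a ha
  by_cases hab : i + 1 ≤ a
  · intro acc
    rw [PySem.List.pyRange_one_eq_nil hab,
        pvGather_of_lt _ _ _ (by omega)]
    simp [pvAInner]
  · push Not at hab
    have hterm : (i + 1 - (a + 1)).toNat < (i + 1 - a).toNat := by omega
    intro acc
    rw [PySem.List.pyRange_one_cons hab]
    by_cases hL : (lines.length : Int) ≤ a
    · have hdrop : (lines.map String.toList).drop a.toNat = [] := by
        apply List.drop_eq_nil_of_le; simp; omega
      simp [pvAInner, hL, hdrop, pvGather]
    · push Not at hL
      have hlt : a.toNat < lines.length := by omega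
      have hdrop : (lines.map String.toList).drop a.toNat
          = lines[a.toNat].toList :: (lines.map String.toList).drop (a.toNat + 1) := by
        rw [List.drop_eq_getElem_cons (by simpa using hlt)]
        simp
      have hrlen : (lines[a.toNat].toList).length = c := hlen _ (List.getElem_mem hlt)
      by_cases hC : (c : Int) ≤ i - a
      · have hstep : pvAInner lines (lines.length : Int) (c : Int) i
              (a :: PySem.List.pyRange (a + 1) (i + 1) 1) acc
            = pvAInner lines (lines.length : Int) (c : Int) i (PySem.List.pyRange (a + 1) (i + 1) 1) acc := by
          simp [pvAInner, hC, not_le.mpr hL]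
        rw [hstep, pvAInner_eq_gather lines c hlen i hi (a + 1) (by omega), hdrop,
            (by omega : (a + 1).toNat = a.toNat + 1)]
        have hneg : ¬ (a.toNat ≤ i.toNat ∧ i.toNat - a.toNat < (lines[a.toNat].toList).length) := by
          rw [hrlen]; omega
        simp only [pvGather, if_neg hneg, List.nil_append]
      · push Not at hC
        have hchar : pvCharAt lines a (i - a) = (lines[a.toNat].toList).getD (i.toNat - a.toNat) ' ' := by
          unfold pvCharAt
          rw [PySem.List.pyGet?_eq_some_getElem lines ha (by exact_mod_cast hL)]
          simp only [Option.getD_some]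
          have hidx : i - a = ((i.toNat - a.toNat : Nat) : Int) := by omega
          rw [hidx, PySem.Str.pyGet?_natCast]
          rw [List.getElem?_eq_getElem (by rw [hrlen]; omega)]
          simp only [Option.getD_some]
          rw [List.getD_eq_getElem _ _ (by rw [hrlen]; omega)]
        have hstep : pvAInner lines (lines.length : Int) (c : Int) i
              (a :: PySem.List.pyRange (a + 1) (i + 1) 1) acc
            = pvAInner lines (lines.length : Int) (c : Int) i (PySem.List.pyRange (a + 1) (i + 1) 1)
                (acc ++ [pvCharAt lines a (i - a)]) := by
          simp [pvAInner, not_le.mpr hL, not_le.mpr hC]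
        rw [hstep, pvAInner_eq_gather lines c hlen i hi (a + 1) (by omega), hdrop, hchar,
            (by omega : (a + 1).toNat = a.toNat + 1)]
        have hpos : (a.toNat ≤ i.toNat ∧ i.toNat - a.toNat < (lines[a.toNat].toList).length) := by
          rw [hrlen]; omega
        simp only [pvGather, if_pos hpos, List.append_assoc, List.singleton_append]
termination_by a _ => (i + 1 - a).toNat
decreasing_by all_goals omega

-- scatter preserves the number of buckets
theorem pvScatterRow_length (x0 : Int) (row : String) :
    ∀ (cells : List Int) (bs : List (List Char)),
      (cells.foldl
        (fun bs y => PySem.List.pySetD bs (x0 + y)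
          (PySem.List.pyGetD bs (x0 + y) [] ++ [(PySem.Str.pyGet? row y).getD ' '])) bs).length
        = bs.length := by
  intro cells
  induction cells with
  | nil => intro bs; rfl
  | cons y cs ih =>
    intro bs
    simp only [List.foldl_cons, ih, PySem.List.length_pySetD]

-- effect of scattering row (of length c, at row index x0, columns from y0) on bucket j
theorem pvScatterRow_getD (row : String) (c : Nat) (hrow : row.toList.length = c)
    (x0 : Int) (hx : 0 ≤ x0) :
    ∀ (y0 : Int), 0 ≤ y0 → ∀ (bs : List (List Char)), x0.toNat + c ≤ bs.length → ∀ (j : Nat),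
      ((PySem.List.pyRange y0 (c : Int) 1).foldl
        (fun bs y => PySem.List.pySetD bs (x0 + y)
          (PySem.List.pyGetD bs (x0 + y) [] ++ [(PySem.Str.pyGet? row y).getD ' '])) bs).getD j []
      = bs.getD j [] ++
          (if x0.toNat + y0.toNat ≤ j ∧ j < x0.toNat + c
           then [row.toList.getD (j - x0.toNat) ' '] else []) := by
  intro y0 hy
  by_cases hend : (c : Int) ≤ y0
  · intro bs _ j
    rw [PySem.List.pyRange_one_eq_nil hend]
    simp only [List.foldl_nil]
    rw [if_neg (by omega)]
    simp
  · push Not at hend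
    have hterm : ((c : Int) - (y0 + 1)).toNat < ((c : Int) - y0).toNat := by omega
    intro bs hb j
    rw [PySem.List.pyRange_one_cons hend, List.foldl_cons]
    have hidx : (x0 + y0).toNat < bs.length := by omega
    have hchar : (PySem.Str.pyGet? row y0).getD ' ' = row.toList.getD y0.toNat ' ' := by
      have hy0 : y0 = ((y0.toNat : Nat) : Int) := by omega
      rw [hy0, PySem.Str.pyGet?_natCast,
          List.getElem?_eq_getElem (by omega),
          List.getD_eq_getElem _ _ (by omega)]
      rfl
    have hset : PySem.List.pySetD bs (x0 + y0)
          (PySem.List.pyGetD bs (x0 + y0) [] ++ [(PySem.Str.pyGet? row y0).getD ' '])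
        = bs.set (x0 + y0).toNat (bs.getD (x0 + y0).toNat [] ++ [row.toList.getD y0.toNat ' ']) := by
      rw [PySem.List.pySetD_of_nonneg _ _ (by omega), PySem.List.pyGetD_of_nonneg _ _ (by omega),
          hchar]
    rw [hset, pvScatterRow_getD row c hrow x0 hx (y0 + 1) (by omega) _ (by simp; omega) j]
    have hnat : (x0 + y0).toNat = x0.toNat + y0.toNat := by omega
    have h1 : (x0.toNat + (y0 + 1).toNat) = x0.toNat + y0.toNat + 1 := by omega
    rw [hnat, h1]
    have hgetset : ∀ (v : List Char) (k : Nat),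
        (bs.set (x0.toNat + y0.toNat) v).getD k []
          = if k = x0.toNat + y0.toNat then v else bs.getD k [] := by
      intro v k
      have hidx' : x0.toNat + y0.toNat < bs.length := by omega
      by_cases hk : k = x0.toNat + y0.toNat
      · subst hk
        simp [List.getD_eq_getElem?_getD, hidx']
      · simp [List.getD_eq_getElem?_getD, Ne.symm hk, hk]
    rw [hgetset]
    by_cases hj : j = x0.toNat + y0.toNat
    · subst hj
      rw [if_pos rfl,
          if_neg (by omega : ¬ (x0.toNat + y0.toNat + 1 ≤ x0.toNat + y0.toNat ∧
            x0.toNat + y0.toNat < x0.toNat + c)),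
          if_pos (by omega)]
      rw [show x0.toNat + y0.toNat - x0.toNat = y0.toNat from by omega]
      simp
    · rw [if_neg hj]
      by_cases hin : x0.toNat + y0.toNat + 1 ≤ j ∧ j < x0.toNat + c
      · rw [if_pos hin, if_pos (by omega)]
      · rw [if_neg hin, if_neg (by omega)]
termination_by y0 _ => ((c : Int) - y0).toNat
decreasing_by all_goals omega

-- effect of the whole row-major scatter pass: bucket j collects exactly diagonal j
theorem pvScatter_getD (c : Nat) :
    ∀ (rows : List String), (∀ s ∈ rows, s.toList.length = c) →
      ∀ (x0 : Int), 0 ≤ x0 → ∀ (bs : List (List Char)),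
        x0.toNat + rows.length + c ≤ bs.length + 1 →
        (((PySem.List.enumerate rows x0).foldl
            (fun bs p =>
              (PySem.List.pyRange 0 (c : Int) 1).foldl
                (fun bs y =>
                  PySem.List.pySetD bs (p.1 + y)
                    (PySem.List.pyGetD bs (p.1 + y) [] ++ [(PySem.Str.pyGet? p.2 y).getD ' ']))
                bs)
            bs).length = bs.length) ∧
        (∀ (j : Nat),
          ((PySem.List.enumerate rows x0).foldl
            (fun bs p =>
              (PySem.List.pyRange 0 (c : Int) 1).foldl
                (fun bs y =>
                  PySem.List.pySetD bs (p.1 + y)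
                    (PySem.List.pyGetD bs (p.1 + y) [] ++ [(PySem.Str.pyGet? p.2 y).getD ' ']))
                bs)
            bs).getD j []
          = bs.getD j [] ++ pvGather x0.toNat j (rows.map String.toList)) := by
  intro rows
  induction rows with
  | nil =>
    intro _ x0 _ bs _
    exact ⟨rfl, fun j => by simp [PySem.List.enumerate_nil, pvGather]⟩
  | cons row rest ih =>
    intro hall x0 hx bs hb
    simp only [List.length_cons] at hb
    rw [PySem.List.enumerate_cons]
    simp only [List.foldl_cons]
    have hrow : row.toList.length = c := hall _ (by simp)
    have hlen1 := pvScatterRow_length x0 row (PySem.List.pyRange 0 (c : Int) 1) bs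
    obtain ⟨ihlen, ihget⟩ := ih (fun s hs => hall s (by simp [hs])) (x0 + 1) (by omega) _
      (by rw [hlen1]; omega)
    refine ⟨by rw [ihlen, hlen1], fun j => ?_⟩
    rw [ihget j, pvScatterRow_getD row c hrow x0 hx 0 (by omega) bs (by omega) j]
    have h1 : (x0 + 1).toNat = x0.toNat + 1 := by omega
    have h2 : x0.toNat + (0 : Int).toNat = x0.toNat := by omega
    rw [h1, h2]
    simp only [List.map_cons, pvGather, hrow, List.append_assoc]
    have hiff : (x0.toNat ≤ j ∧ j < x0.toNat + c) ↔ (x0.toNat ≤ j ∧ j - x0.toNat < c) := by omega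
    simp only [hiff]

-- every initial bucket is empty
theorem pvBuckets0_getD {α : Type} (xs : List α) (j : Nat) :
    ((xs.map (fun _ => ([] : List Char))).getD j []) = [] := by
  induction xs generalizing j with
  | nil => simp
  | cons _ t ih =>
    cases j with
    | zero => simp
    | succ k => exact ih k

-- under Pre_, every line has the head's length and max() returns it
theorem pvMaxCol_eq (lines : List String) (hne : lines ≠ [])
    (hlen : ∀ s ∈ lines, PySem.Str.len s = PySem.Str.len (lines.headD "")) :
    pvMaxCol lines = ((lines.headD "").toList.length : Int) := by
  unfold pvMaxCol
  cases h : PySem.List.max? (lines.map (fun s => PySem.Str.len s)) (fun n => n) with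
  | none =>
    exfalso
    rw [PySem.List.max?_eq_none_iff] at h
    simp at h
    exact hne h
  | some m =>
    have hm := PySem.List.max?_mem h
    simp only [List.mem_map] at hm
    obtain ⟨s, hs, rfl⟩ := hm
    rw [hlen s hs, PySem.Str.len_eq]
    rfl

-- ===== VERDICT (by name: the statement is the Claim_ definition above) =====
theorem diagonal_matrix_spec : Claim_equal_diagonal_matrix := by
  intro lines _ hpre
  obtain ⟨hne, hlenS⟩ := hpre
  unfold Spec_diagonal_matrix diagonal_matrix diagonal_matrix_alt
  set c : Nat := (lines.headD "").toList.length with hc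
  have hmax : pvMaxCol lines = (c : Int) := pvMaxCol_eq lines hne hlenS
  have hlen : ∀ s ∈ lines, s.toList.length = c := by
    intro s hs
    have := hlenS s hs
    rw [PySem.Str.len_eq, PySem.Str.len_eq] at this
    exact_mod_cast this
  have hsum : (PySem.List.len lines) + (c : Int) = ((lines.length + c : Nat) : Int) := by
    simp [PySem.List.len]
  dsimp only
  rw [hmax, hsum, PySem.List.pyRange_zero_natCast, PySem.List.foldl_append_singleton_eq_map,
      List.nil_append]
  have hA : ∀ k : Nat,
      String.ofList (pvAInner lines (PySem.List.len lines) ((c : Nat) : Int) ((k : Nat) : Int)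
          (PySem.List.pyRange 0 (((k : Nat) : Int) + 1) 1) [])
        = String.ofList (pvGather 0 k (lines.map String.toList)) := by
    intro k
    have := pvAInner_eq_gather lines c hlen (k : Int) (by omega) 0 (by omega) []
    simp only [PySem.List.len] at this ⊢
    rw [this]
    simp
  obtain ⟨hblen, hbget⟩ := pvScatter_getD c lines hlen 0 (by omega)
    (((List.range (lines.length + c)).map (fun k => ((k : Nat) : Int))).map (fun _ => []))
    (by simp)
  have h0len : (((List.range (lines.length + c)).map (fun k => ((k : Nat) : Int))).map
      (fun _ => ([] : List Char))).length = lines.length + c := by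
    simp
  have hbl : (((PySem.List.enumerate lines 0).foldl
      (fun bs p =>
        (PySem.List.pyRange 0 (c : Int) 1).foldl
          (fun bs y =>
            PySem.List.pySetD bs (p.1 + y)
              (PySem.List.pyGetD bs (p.1 + y) [] ++ [(PySem.Str.pyGet? p.2 y).getD ' ']))
          bs)
      (((List.range (lines.length + c)).map (fun k => ((k : Nat) : Int))).map (fun _ => [])))).length
      = lines.length + c := by
    rw [hblen, h0len]
  apply List.ext_getElem
  · simp only [List.length_map, List.length_range, hbl]
  · intro j h1 h2
    have hjlt : j < lines.length + c := by
      simp at h1; omega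
    simp only [List.getElem_map, List.getElem_range]
    rw [hA j]
    congr 1
    have hb := hbget j
    rw [pvBuckets0_getD, List.nil_append, Int.toNat_zero] at hb
    rw [← hb, List.getD_eq_getElem _ _ (by rw [hbl]; omega)]
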